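-- pv_equiv track=rewrite | github.com/itjey/gjrc | base_same.py | collect_codey_lines
-- ===== SOURCE A (Python) =====
-- from typing import Dict, Optional, List
--
-- def collect_codey_lines(text: str) -> Optional[str]:
--     kws = ("import", "def ", "for ", "while ", "if ", "=", "print", "return")
--     lines, in_block = [], False
--     for ln in text.splitlines():
--         s = ln.strip()
--         if not in_block and any(k in s for k in kws):
--             in_block = True
--         if in_block and s:
--             lines.append(ln)
--     code = "\n".join(lines).strip()
--     return code if len(code) >= 4 else None
-- ===== SOURCE B (Python) =====
-- def collect_codey_lines(text: str):
--     kws = ("import", "def ", "for ", "while ", "if ", "=", "print", "return")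
--     suffix, best = [], None
--     for ln in reversed(text.splitlines()):
--         s = ln.strip()
--         if s:
--             suffix = [ln] + suffix
--         if any(k in s for k in kws):
--             best = suffix
--     if best is None:
--         return None
--     code = "\n".join(best).strip()
--     return code if len(code) >= 4 else None
-- ===== Notes on version B (the rewrite author's own statement) =====
-- stated objective: alternative
-- what changed: Traverses the lines backward in one fold, maintaining the non-blank suffix of lines seen so far and snapshotting it whenever a keyword line is met; the last snapshot (the first keyword line in forward order) is joined and length-checked, with no latched boolean state.
import Mathlib
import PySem

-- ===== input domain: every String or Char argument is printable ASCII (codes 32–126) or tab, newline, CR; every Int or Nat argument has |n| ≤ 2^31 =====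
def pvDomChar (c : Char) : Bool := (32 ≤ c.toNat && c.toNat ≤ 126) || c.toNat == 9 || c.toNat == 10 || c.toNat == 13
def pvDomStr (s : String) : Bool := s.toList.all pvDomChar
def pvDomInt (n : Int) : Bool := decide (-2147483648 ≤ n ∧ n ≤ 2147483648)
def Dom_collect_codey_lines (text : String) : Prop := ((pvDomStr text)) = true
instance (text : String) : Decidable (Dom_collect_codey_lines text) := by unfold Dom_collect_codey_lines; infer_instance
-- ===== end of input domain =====

-- B replaces A's forward latched loop by a single backward fold that maintains the
-- non-blank suffix and snapshots it at each keyword line; alternative, same cost.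

def pvKws : List String := ["import", "def ", "for ", "while ", "if ", "=", "print", "return"]

-- ===== PORT A =====
def collect_codey_lines (text : String) : Option String :=
  let st := (PySem.Str.splitlines text).foldl
    (fun (acc : List String × Bool) ln =>
      let s := PySem.Str.strip ln
      let inb := if !acc.2 && pvKws.any (fun k => PySem.Str.isIn k s) then true else acc.2
      if inb && (s != "") then (acc.1 ++ [ln], inb) else (acc.1, inb))
    ([], false)
  let code := PySem.Str.strip (PySem.Str.join "\n" st.1)
  if 4 ≤ PySem.Str.len code then some code else none

-- ===== PORT B =====
-- Source B's loop over reversed(lines) with state (suffix, best) is exactly a foldr.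
def collect_codey_lines_alt (text : String) : Option String :=
  let st := (PySem.Str.splitlines text).foldr
    (fun ln (acc : List String × Option (List String)) =>
      let s := PySem.Str.strip ln
      let suffix := if s != "" then ln :: acc.1 else acc.1
      let best := if pvKws.any (fun k => PySem.Str.isIn k s) then some suffix else acc.2
      (suffix, best))
    ([], none)
  match st.2 with
  | none => none
  | some best =>
    let code := PySem.Str.strip (PySem.Str.join "\n" best)
    if 4 ≤ PySem.Str.len code then some code else none

-- ===== PRECONDITION & SPEC =====
def Spec_collect_codey_lines (text : String) (out : Option String) : Prop := out = collect_codey_lines_alt text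
instance (text : String) (out : Option String) : Decidable (Spec_collect_codey_lines text out) := by unfold Spec_collect_codey_lines; infer_instance

-- ===== CLAIM (what is proved, stated in full; the proofs are below) =====
def Claim_equal_collect_codey_lines : Prop := ∀ (text : String), Dom_collect_codey_lines text → Spec_collect_codey_lines text (collect_codey_lines text)

-- ===== LEMMAS AND PROOFS =====

def pvHit (ln : String) : Bool := pvKws.any (fun k => PySem.Str.isIn k (PySem.Str.strip ln))

def pvNB (ln : String) : Bool := PySem.Str.strip ln != ""

def pvStepA (acc : List String × Bool) (ln : String) : List String × Bool :=
  let s := PySem.Str.strip ln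
  let inb := if !acc.2 && pvKws.any (fun k => PySem.Str.isIn k s) then true else acc.2
  if inb && (s != "") then (acc.1 ++ [ln], inb) else (acc.1, inb)

def pvStepB (ln : String) (acc : List String × Option (List String)) :
    List String × Option (List String) :=
  let s := PySem.Str.strip ln
  let suffix := if s != "" then ln :: acc.1 else acc.1
  let best := if pvKws.any (fun k => PySem.Str.isIn k s) then some suffix else acc.2
  (suffix, best)

theorem pvFoldA_true (ls : List String) (acc : List String) :
    ls.foldl pvStepA (acc, true) = (acc ++ ls.filter pvNB, true) := by
  induction ls generalizing acc with
  | nil => simp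
  | cons h t ih =>
    simp only [List.foldl_cons, List.filter_cons]
    by_cases hs : PySem.Str.strip h = ""
    · simp [pvStepA, pvNB, hs, ih]
    · simp [pvStepA, pvNB, hs, ih]

theorem pvFoldA_false (ls : List String) (acc : List String) :
    ls.foldl pvStepA (acc, false) =
      match ls.findIdx? pvHit with
      | none => (acc, false)
      | some i => (acc ++ (ls.drop i).filter pvNB, true) := by
  induction ls generalizing acc with
  | nil => simp
  | cons h t ih =>
    rw [List.findIdx?_cons]
    by_cases hh : pvHit h = true
    · have hex : ∃ x ∈ pvKws, PySem.Chars.isIn x.toList (PySem.Chars.strip h.toList) = true := by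
        simpa [pvHit] using hh
      have hstep : pvStepA (acc, false) h =
          ((if PySem.Str.strip h != "" then acc ++ [h] else acc), true) := by
        simp only [pvStepA]
        by_cases hc : PySem.Str.strip h = ""
        · have hc' : PySem.Chars.strip h.toList = ([] : List Char) := by
            have h2 := congrArg String.toList hc
            simpa using h2
          rw [hc'] at hex
          simp [hex, hc]
        · simp [hex, hc]
      simp only [List.foldl_cons, hstep]
      rw [pvFoldA_true]
      by_cases hs : PySem.Str.strip h = "" <;> simp [hh, pvNB, hs]
    · have hh0 : pvHit h = false := by simpa using hh
      have hex0 : ¬ ∃ x ∈ pvKws, PySem.Chars.isIn x.toList (PySem.Chars.strip h.toList) = true := by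
        simpa [pvHit] using hh0
      have hstep : pvStepA (acc, false) h = (acc, false) := by
        simp [pvStepA, hex0]
      simp only [List.foldl_cons, hstep, ih, hh0]
      cases hfi : t.findIdx? pvHit with
      | none => simp
      | some i => simp

theorem pvFoldB (ls : List String) :
    ls.foldr pvStepB ([], none) =
      (ls.filter pvNB,
       match ls.findIdx? pvHit with
       | none => none
       | some i => some ((ls.drop i).filter pvNB)) := by
  induction ls with
  | nil => simp
  | cons h t ih =>
    rw [List.foldr_cons, ih, List.findIdx?_cons]
    simp only [pvStepB]
    rw [show (pvKws.any fun k => PySem.Str.isIn k (PySem.Str.strip h)) = pvHit h from rfl]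
    by_cases hh : pvHit h = true
    · simp [hh, List.filter_cons, pvNB]
    · have hh0 : pvHit h = false := by simpa using hh
      cases hfi : t.findIdx? pvHit with
      | none => simp [hh0, List.filter_cons, pvNB]
      | some i => simp [hh0, List.filter_cons, pvNB]

-- ===== VERDICT (by name: the statement is the Claim_ definition above) =====
theorem collect_codey_lines_spec : Claim_equal_collect_codey_lines := by
  intro text _
  show collect_codey_lines text = collect_codey_lines_alt text
  unfold collect_codey_lines collect_codey_lines_alt
  rw [show (fun (acc : List String × Bool) ln =>
      let s := PySem.Str.strip ln
      let inb := if !acc.2 && pvKws.any (fun k => PySem.Str.isIn k s) then true else acc.2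
      if inb && (s != "") then (acc.1 ++ [ln], inb) else (acc.1, inb)) = pvStepA from rfl]
  rw [show (fun ln (acc : List String × Option (List String)) =>
      let s := PySem.Str.strip ln
      let suffix := if s != "" then ln :: acc.1 else acc.1
      let best := if pvKws.any (fun k => PySem.Str.isIn k s) then some suffix else acc.2
      (suffix, best)) = pvStepB from rfl]
  rw [pvFoldA_false, pvFoldB]
  cases hfi : (PySem.Str.splitlines text).findIdx? pvHit with
  | none => simp
  | some i => simp
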